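-- pv_equiv track=rewrite | github.com/linhdvu14/cp-sols | sols/CodeForces/1810_d12_codeton/E_Monsters.py | solve
-- ===== SOURCE A (Python) =====
-- from heapq import heappush, heappop
--
-- def solve(N, M, A, edges):
--     adj = [[] for _ in range(N)]
--     for u, v in edges:
--         adj[u - 1].append(v - 1)
--         adj[v - 1].append(u - 1)
--
--     def expand(src):
--         h = [(A[src], src)]
--         sz = 0
--         seen = {src}
--         while h and h[0][0] <= sz:
--             _, u = heappop(h)
--             won[u] = 1
--             sz += 1
--             for v in adj[u]:
--                 if v not in seen:
--                     heappush(h, (A[v], v))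
--                     seen.add(v)
--         return sz == N
--
--     won = [0] * N
--     for u in range(N):
--         if won[u] or A[u]: continue
--         if expand(u): return 'YES'
--
--     return 'NO'
-- ===== SOURCE B (Python) =====
-- def solve(N, M, A, edges):
--     adj = [[] for _ in range(N)]
--     for u, v in edges:
--         adj[u - 1].append(v - 1)
--         adj[v - 1].append(u - 1)
--
--     won = [0] * N
--     for s in range(N):
--         if won[s] or A[s]:
--             continue
--         # flood-fill from s, keeping the seen-but-unabsorbed frontier in a
--         # plain list and scanning it for its minimum instead of using a heap
--         frontier = [(A[s], s)]
--         seen = {s}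
--         sz = 0
--         while frontier:
--             best = frontier[0]
--             for t in frontier:
--                 if t < best:
--                     best = t
--             if best[0] > sz:
--                 break
--             frontier.remove(best)
--             won[best[1]] = 1
--             sz += 1
--             for v in adj[best[1]]:
--                 if v not in seen:
--                     seen.add(v)
--                     frontier.append((A[v], v))
--         if sz == N:
--             return 'YES'
--     return 'NO'
-- ===== Notes on version B (the rewrite author's own statement) =====
-- stated objective: alternative
-- what changed: The heap-ordered frontier of the flood-fill is replaced by a plain list that is scanned linearly for its minimum (strength, node) entry each step, removing the heapq data structure entirely; outer loop and persistent won-memoization stay.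
-- outside the precondition, e.g. on solve(4, 2, [0, -1, 0], [(1, 2), (0, -1)]): A returns 'NO', B returns 'NO'
import Mathlib
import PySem

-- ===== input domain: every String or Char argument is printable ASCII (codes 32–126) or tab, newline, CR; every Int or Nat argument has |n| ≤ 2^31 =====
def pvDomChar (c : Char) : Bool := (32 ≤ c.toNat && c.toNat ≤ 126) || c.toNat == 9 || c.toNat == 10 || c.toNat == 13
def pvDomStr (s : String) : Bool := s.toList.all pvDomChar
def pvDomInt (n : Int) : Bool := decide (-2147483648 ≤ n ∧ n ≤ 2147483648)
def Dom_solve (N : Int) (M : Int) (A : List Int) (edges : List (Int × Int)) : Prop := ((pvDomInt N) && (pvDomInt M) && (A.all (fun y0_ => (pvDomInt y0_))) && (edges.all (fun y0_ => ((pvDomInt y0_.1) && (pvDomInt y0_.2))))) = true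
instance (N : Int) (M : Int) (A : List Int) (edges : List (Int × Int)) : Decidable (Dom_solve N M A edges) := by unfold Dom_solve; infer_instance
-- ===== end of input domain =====

-- B replaces the heap-ordered frontier by a plain list scanned linearly for its minimum each
-- step (no heapq); same greedy flood-fill, same persistent `won` memoization (alternative, not faster).

-- Python's '<' on (int, int) tuples: lexicographic.  Hand-ported; exact for pairs of ints.
def pvLt (a b : Int × Int) : Bool := a.1 < b.1 || (a.1 == b.1 && a.2 < b.2)

-- shared by both ports, because both Pythons build the adjacency lists with the same loop:
-- adj = [[] for _ in range(N)]; for u, v in edges: adj[u-1].append(v-1); adj[v-1].append(u-1)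
def pvAdj (N : Int) (edges : List (Int × Int)) : List (List Int) :=
  edges.foldl (fun adj e =>
    let adj1 := PySem.List.pySetD adj (e.1 - 1) (PySem.List.pyGetD adj (e.1 - 1) [] ++ [e.2 - 1])
    PySem.List.pySetD adj1 (e.2 - 1) (PySem.List.pyGetD adj1 (e.2 - 1) [] ++ [e.1 - 1]))
    ((PySem.List.pyRange 0 N 1).map (fun _ => ([] : List Int)))

-- ===== PORT A =====
-- heapq._siftdown, transliterated (list as array; getD/set with the Nat indices the loop produces)
def pvSiftdownLoop (newitem : Int × Int) (heap : List (Int × Int)) (startpos pos : Nat) :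
    List (Int × Int) × Nat :=
  if _h : startpos < pos then
    let parentpos := (pos - 1) / 2
    let parent := heap.getD parentpos (0, 0)
    if pvLt newitem parent then
      pvSiftdownLoop newitem (heap.set pos parent) startpos parentpos
    else (heap, pos)
  else (heap, pos)
termination_by pos
decreasing_by omega

def pvSiftdown (heap : List (Int × Int)) (startpos pos : Nat) : List (Int × Int) :=
  let newitem := heap.getD pos (0, 0)
  let r := pvSiftdownLoop newitem heap startpos pos
  r.1.set r.2 newitem

-- heapq._siftup, transliterated
def pvSiftupLoop (heap : List (Int × Int)) (pos childpos endpos : Nat) :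
    List (Int × Int) × Nat :=
  if _h : childpos < endpos then
    let rightpos := childpos + 1
    let childpos' := if rightpos < endpos && !(pvLt (heap.getD childpos (0,0)) (heap.getD rightpos (0,0))) then rightpos else childpos
    let heap' := heap.set pos (heap.getD childpos' (0,0))
    pvSiftupLoop heap' childpos' (2 * childpos' + 1) endpos
  else (heap, pos)
termination_by endpos - childpos
decreasing_by split <;> omega

def pvSiftup (heap : List (Int × Int)) (pos : Nat) : List (Int × Int) :=
  let endpos := heap.length
  let startpos := pos
  let newitem := heap.getD pos (0, 0)
  let r := pvSiftupLoop heap pos (2 * pos + 1) endpos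
  pvSiftdown (r.1.set r.2 newitem) startpos r.2

-- heapq.heappush: heap.append(item); _siftdown(heap, 0, len(heap)-1)
def pvHeappush (heap : List (Int × Int)) (item : Int × Int) : List (Int × Int) :=
  pvSiftdown (heap ++ [item]) 0 heap.length

-- heapq.heappop (only ever called on a nonempty heap; the [] branch is an unreachable guard)
def pvHeappop (heap : List (Int × Int)) : (Int × Int) × List (Int × Int) :=
  match heap.getLast? with
  | none => ((0, 0), [])
  | some lastelt =>
    let rest := heap.dropLast
    if rest.isEmpty then (lastelt, rest)
    else (rest.getD 0 (0, 0), pvSiftup (rest.set 0 lastelt) 0)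

-- body of 'for v in adj[u]: if v not in seen: heappush(h, (A[v], v)); seen.add(v)'
def pvPushA (Alist : List Int) (st : List (Int × Int) × PySem.Set Int) (v : Int) :
    List (Int × Int) × PySem.Set Int :=
  if PySem.Set.contains st.2 v then st
  else (pvHeappush st.1 (PySem.List.pyGetD Alist v 0, v), PySem.Set.add st.2 v)

-- the 'while h and h[0][0] <= sz' loop of expand; fuel only bounds the iteration count
def pvExpandA (Alist : List Int) (adj : List (List Int)) :
    Nat → List (Int × Int) → Int → PySem.Set Int → List Int → Int × List Int
  | 0, _, sz, _, won => (sz, won)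
  | fuel + 1, h, sz, seen, won =>
    if h ≠ [] ∧ (h.getD 0 (0, 0)).1 ≤ sz then
      let p := pvHeappop h
      let won' := PySem.List.pySetD won p.1.2 1
      let st := (PySem.List.pyGetD adj p.1.2 []).foldl (pvPushA Alist) (p.2, seen)
      pvExpandA Alist adj fuel st.1 (sz + 1) st.2 won'
    else (sz, won)

-- 'for u in range(N): if won[u] or A[u]: continue; if expand(u): return "YES"'; 'return "NO"'
def pvOuterA (N : Int) (Alist : List Int) (adj : List (List Int)) (fuel : Nat) :
    List Int → List Int → String
  | [], _ => "NO"
  | u :: rest, won =>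
    if PySem.List.pyGetD won u 0 ≠ 0 ∨ PySem.List.pyGetD Alist u 0 ≠ 0 then
      pvOuterA N Alist adj fuel rest won
    else
      let r := pvExpandA Alist adj fuel [(PySem.List.pyGetD Alist u 0, u)] 0
                 (PySem.Set.add PySem.Set.empty u) won
      if r.1 == N then "YES" else pvOuterA N Alist adj fuel rest r.2

def solve (N : Int) (M : Int) (A : List Int) (edges : List (Int × Int)) : String :=
  pvOuterA N A (pvAdj N edges) (2 * edges.length + 2)
    (PySem.List.pyRange 0 N 1) (List.replicate N.toNat 0)

-- ===== PORT B =====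
-- 'best = frontier[0]; for t in frontier: if t < best: best = t'  (linear min scan)
def pvMinScan (f : List (Int × Int)) : Int × Int :=
  f.foldl (fun best t => if pvLt t best then t else best) (f.getD 0 (0, 0))

-- body of 'for v in adj[best[1]]: if v not in seen: seen.add(v); frontier.append((A[v], v))'
def pvPushB (Alist : List Int) (st : List (Int × Int) × PySem.Set Int) (v : Int) :
    List (Int × Int) × PySem.Set Int :=
  if PySem.Set.contains st.2 v then st
  else (st.1 ++ [(PySem.List.pyGetD Alist v 0, v)], PySem.Set.add st.2 v)

-- Source B's 'while frontier' loop; fuel only bounds the iteration count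
def pvExpandB (Alist : List Int) (adj : List (List Int)) :
    Nat → List (Int × Int) → Int → PySem.Set Int → List Int → Int × List Int
  | 0, _, sz, _, won => (sz, won)
  | fuel + 1, f, sz, seen, won =>
    if f ≠ [] then
      let best := pvMinScan f
      if sz < best.1 then (sz, won)
      else
        let f' := (PySem.List.remove? f best).getD f
        let won' := PySem.List.pySetD won best.2 1
        let st := (PySem.List.pyGetD adj best.2 []).foldl (pvPushB Alist) (f', seen)
        pvExpandB Alist adj fuel st.1 (sz + 1) st.2 won'
    else (sz, won)

def pvOuterB (N : Int) (Alist : List Int) (adj : List (List Int)) (fuel : Nat) :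
    List Int → List Int → String
  | [], _ => "NO"
  | s :: rest, won =>
    if PySem.List.pyGetD won s 0 ≠ 0 ∨ PySem.List.pyGetD Alist s 0 ≠ 0 then
      pvOuterB N Alist adj fuel rest won
    else
      let r := pvExpandB Alist adj fuel [(PySem.List.pyGetD Alist s 0, s)] 0
                 (PySem.Set.add PySem.Set.empty s) won
      if r.1 == N then "YES" else pvOuterB N Alist adj fuel rest r.2

def solve_alt (N : Int) (M : Int) (A : List Int) (edges : List (Int × Int)) : String :=
  pvOuterB N A (pvAdj N edges) (2 * edges.length + 2)
    (PySem.List.pyRange 0 N 1) (List.replicate N.toNat 0)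

-- ===== PRECONDITION & SPEC =====
-- Pre_ requires every edge endpoint in [1-N, N] and (for N > 0) len(A) ≥ N: outside this A
-- raises IndexError, except on some degenerate inputs with non-positive endpoints and a short A
-- where A returns only because negative-index wraparound marks the missing nodes as won.
def Pre_solve (N : Int) (M : Int) (A : List Int) (edges : List (Int × Int)) : Prop :=
  (0 < N → N ≤ (A.length : Int)) ∧
  ∀ e ∈ edges, 0 < N ∧ 1 - N ≤ e.1 ∧ e.1 ≤ N ∧ 1 - N ≤ e.2 ∧ e.2 ≤ N
instance (N : Int) (M : Int) (A : List Int) (edges : List (Int × Int)) : Decidable (Pre_solve N M A edges) := by unfold Pre_solve; infer_instance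

def pvWitness_solve : Int × Int × List Int × (List (Int × Int)) := (2, 1, [0, 0], [(1, 2)])

def Spec_solve (N : Int) (M : Int) (A : List Int) (edges : List (Int × Int)) (out : String) : Prop := out = solve_alt N M A edges
instance (N : Int) (M : Int) (A : List Int) (edges : List (Int × Int)) (out : String) : Decidable (Spec_solve N M A edges out) := by unfold Spec_solve; infer_instance

-- ===== CLAIM (what is proved, stated in full; the proofs are below) =====
def Claim_equal_solve : Prop := ∀ (N : Int) (M : Int) (A : List Int) (edges : List (Int × Int)), Dom_solve N M A edges → Pre_solve N M A edges → Spec_solve N M A edges (solve N M A edges)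

-- ===== LEMMAS AND PROOFS =====

-- ---- the strict lexicographic order pvLt ----
theorem pvLt_irrefl (a : Int × Int) : pvLt a a = false := by
  simp [pvLt]

theorem pvLe_trans {a b c : Int × Int} (h1 : pvLt b a = false) (h2 : pvLt c b = false) :
    pvLt c a = false := by
  simp [pvLt] at *; omega

theorem pvLe_antisymm {a b : Int × Int} (h1 : pvLt a b = false) (h2 : pvLt b a = false) :
    a = b := by
  obtain ⟨a1, a2⟩ := a; obtain ⟨b1, b2⟩ := b
  simp [pvLt] at *; omega

theorem pvLe_of_lt {a b : Int × Int} (h : pvLt a b = true) : pvLt b a = false := by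
  simp [pvLt] at *; omega

-- ---- getD / set infrastructure ----
theorem pv_getD_set_self {α : Type} (l : List α) (i : Nat) (x d : α) (h : i < l.length) :
    (l.set i x).getD i d = x := by
  simp [List.getD, h]

theorem pv_getD_set_ne {α : Type} (l : List α) (i j : Nat) (x d : α) (h : i ≠ j) :
    (l.set i x).getD j d = l.getD j d := by
  simp [List.getD, List.getElem?_set_ne h]

theorem pv_set_getD_self {α : Type} (l : List α) (i : Nat) (d : α) (h : i < l.length) :
    l.set i (l.getD i d) = l := by
  induction l generalizing i with
  | nil => simp at h
  | cons hd tl ih =>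
    cases i with
    | zero => simp [List.getD]
    | succ n => simp at h; simp [List.getD] at *; exact ih n h

theorem pv_set_append_last {α : Type} (l : List α) (a b : α) :
    (l ++ [a]).set l.length b = l ++ [b] := by
  induction l with
  | nil => simp
  | cons hd tl ih => simp [ih]

theorem pv_getD_append_length {α : Type} (l : List α) (a d : α) :
    (l ++ [a]).getD l.length d = a := by
  induction l with
  | nil => simp [List.getD]
  | cons hd tl ih => simpa [List.getD] using ih

-- conceptual multiset of 'l with position i overwritten by x'
theorem pv_mset_set {α : Type} (l : List α) (i : Nat) (x d : α) (h : i < l.length) :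
    (l.getD i d) ::ₘ ((l.set i x : List α) : Multiset α) = x ::ₘ (l : Multiset α) := by
  induction l generalizing i with
  | nil => simp at h
  | cons hd tl ih =>
    cases i with
    | zero => simp [List.getD]; exact List.Perm.swap _ _ _
    | succ n =>
      simp at h
      have := ih n h
      simp only [List.getD] at *
      simp only [List.set, ← Multiset.cons_coe]
      calc (tl[n]?.getD d) ::ₘ hd ::ₘ ↑(tl.set n x)
          = hd ::ₘ ((tl[n]?.getD d) ::ₘ ↑(tl.set n x)) := Multiset.cons_swap _ _ _
        _ = hd ::ₘ x ::ₘ ↑tl := by rw [this]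
        _ = x ::ₘ hd ::ₘ ↑tl := Multiset.cons_swap _ _ _

-- ---- the binary-heap invariant ----
def HInv (h : List (Int × Int)) : Prop :=
  ∀ i, 0 < i → i < h.length →
    pvLt (h.getD i (0,0)) (h.getD ((i-1)/2) (0,0)) = false

-- 'h with a hole at pos, conceptually filled by x': all heap edges not pointing into the
-- hole hold in h.set pos x, and the children of the hole also dominate the hole's parent
def InvHole (h : List (Int × Int)) (pos : Nat) (x : Int × Int) : Prop :=
  (∀ i, 0 < i → i < h.length → i ≠ pos →
     pvLt ((h.set pos x).getD i (0,0)) ((h.set pos x).getD ((i-1)/2) (0,0)) = false) ∧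
  (∀ c, 0 < c → c < h.length → (c-1)/2 = pos → 0 < pos →
     pvLt (h.getD c (0,0)) (h.getD ((pos-1)/2) (0,0)) = false)

theorem pv_root_min {h : List (Int × Int)} (inv : HInv h) :
    ∀ i, i < h.length → pvLt (h.getD i (0,0)) (h.getD 0 (0,0)) = false := by
  intro i
  induction i using Nat.strong_induction_on with
  | _ i ih =>
    intro hi
    rcases Nat.eq_zero_or_pos i with h0 | h0
    · subst h0; exact pvLt_irrefl _
    · exact pvLe_trans (ih ((i-1)/2) (by omega) (by omega)) (inv i h0 hi)

theorem pv_mem_le_root {h : List (Int × Int)} (inv : HInv h) {x : Int × Int} (hx : x ∈ h) :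
    pvLt x (h.getD 0 (0,0)) = false := by
  obtain ⟨i, hi, rfl⟩ := List.mem_iff_getElem.mp hx
  have : h.getD i (0,0) = h[i] := by simp [List.getD, List.getElem?_eq_getElem hi]
  rw [← this]; exact pv_root_min inv i hi

-- unfolding equations for pvSiftdownLoop with startpos = 0 (the only call shape in heapq's use here)
theorem pv_sdl_zero (x : Int × Int) (h : List (Int × Int)) :
    pvSiftdownLoop x h 0 0 = (h, 0) := by
  rw [pvSiftdownLoop]; simp

theorem pv_sdl_step (x : Int × Int) (h : List (Int × Int)) (pos : Nat) (hp : 0 < pos)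
    (hlt : pvLt x (h.getD ((pos-1)/2) (0,0)) = true) :
    pvSiftdownLoop x h 0 pos
      = pvSiftdownLoop x (h.set pos (h.getD ((pos-1)/2) (0,0))) 0 ((pos-1)/2) := by
  rw [pvSiftdownLoop]; simp only [List.getD] at hlt; simp [hp, hlt]

theorem pv_sdl_stop (x : Int × Int) (h : List (Int × Int)) (pos : Nat) (hp : 0 < pos)
    (hlt : pvLt x (h.getD ((pos-1)/2) (0,0)) = false) :
    pvSiftdownLoop x h 0 pos = (h, pos) := by
  rw [pvSiftdownLoop]; simp only [List.getD] at hlt; simp [hp, hlt]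

theorem pv_sdl_spec (x : Int × Int) :
    ∀ pos (h : List (Int × Int)), pos < h.length → InvHole h pos x →
      (pvSiftdownLoop x h 0 pos).2 < (pvSiftdownLoop x h 0 pos).1.length ∧
      (pvSiftdownLoop x h 0 pos).1.length = h.length ∧
      ((((pvSiftdownLoop x h 0 pos).1.set (pvSiftdownLoop x h 0 pos).2 x : List (Int × Int)) : Multiset (Int × Int))
        = ((h.set pos x : List (Int × Int)) : Multiset (Int × Int))) ∧
      HInv ((pvSiftdownLoop x h 0 pos).1.set (pvSiftdownLoop x h 0 pos).2 x) := by
  intro pos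
  induction pos using Nat.strong_induction_on with
  | _ pos ih =>
    intro h hlen hole
    rcases Nat.eq_zero_or_pos pos with h0 | h0
    · subst h0
      rw [pv_sdl_zero]
      refine ⟨hlen, rfl, rfl, ?_⟩
      intro i hi hilen
      exact hole.1 i hi (by simpa using hilen) (by omega)
    · set pp := (pos - 1) / 2 with hpp
      have hpplt : pp < pos := by omega
      have hpplen : pp < h.length := by omega
      set parent := h.getD pp (0,0) with hparent
      by_cases hx : pvLt x parent = true
      · -- move the hole up
        rw [pv_sdl_step x h pos h0 (by rwa [← hparent])]
        set h' := h.set pos parent with hh'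
        have hlen' : h'.length = h.length := by simp [hh']
        have hole' : InvHole h' pp x := by
          constructor
          · intro i hi hilen hipp
            rw [hlen'] at hilen
            have giA : ∀ j, j ≠ pp → j ≠ pos → j < h.length →
                (h'.set pp x).getD j (0,0) = h.getD j (0,0) := by
              intro j hj1 hj2 _
              rw [pv_getD_set_ne _ _ _ _ _ (by omega), hh', pv_getD_set_ne _ _ _ _ _ (by omega)]
            have gpp : (h'.set pp x).getD pp (0,0) = x :=
              pv_getD_set_self _ _ _ _ (by rw [hlen']; exact hpplen)
            have gpos : (h'.set pp x).getD pos (0,0) = parent := by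
              rw [pv_getD_set_ne _ _ _ _ _ (by omega), hh',
                pv_getD_set_self _ _ _ _ hlen]
            by_cases hipos : i = pos
            · -- i = pos: its parent is pp, which now holds x
              rw [hipos, gpos, ← hpp, gpp]
              exact pvLe_of_lt hx
            · have hgi : (h'.set pp x).getD i (0,0) = h.getD i (0,0) :=
                giA i hipp hipos hilen
              by_cases hpar : (i - 1) / 2 = pp
              · -- sibling of pos under pp: h[i] ≥ parent > x
                rw [hgi, hpar, gpp]
                have c1 := hole.1 i hi hilen hipos
                rw [pv_getD_set_ne _ _ _ _ _ (by omega), hpar,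
                  pv_getD_set_ne _ _ _ _ _ (by omega)] at c1
                exact pvLe_trans (pvLe_of_lt hx) c1
              · by_cases hpar2 : (i - 1) / 2 = pos
                · -- child of the old hole: clause 2 of the old InvHole
                  rw [hgi, hpar2, gpos]
                  exact hole.2 i hi hilen hpar2 h0
                · rw [hgi, giA ((i-1)/2) hpar hpar2 (by omega)]
                  have c1 := hole.1 i hi hilen hipos
                  rw [pv_getD_set_ne _ _ _ _ _ (by omega),
                    pv_getD_set_ne _ _ _ _ _ (by omega)] at c1
                  exact c1
          · intro c hc hclen hcpar hpp0
            rw [hlen'] at hclen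
            have ggp : h'.getD ((pp-1)/2) (0,0) = h.getD ((pp-1)/2) (0,0) := by
              rw [hh', pv_getD_set_ne _ _ _ _ _ (by omega)]
            have cpp := hole.1 pp hpp0 hpplen (by omega)
            rw [pv_getD_set_ne _ _ _ _ _ (by omega),
              pv_getD_set_ne _ _ _ _ _ (by omega)] at cpp
            by_cases hcpos : c = pos
            · subst hcpos
              rw [hh', pv_getD_set_self _ _ _ _ hlen, ggp]
              exact cpp
            · rw [hh', pv_getD_set_ne _ _ _ _ _ (by omega)]
              rw [hh'] at ggp
              rw [ggp]
              have cc := hole.1 c hc hclen hcpos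
              rw [pv_getD_set_ne _ _ _ _ _ (by omega), hcpar,
                pv_getD_set_ne _ _ _ _ _ (by omega)] at cc
              exact pvLe_trans cpp cc
        obtain ⟨r1, r2, r3, r4⟩ := ih pp hpplt h' (by rw [hlen']; exact hpplen) hole'
        refine ⟨r1, by rw [r2, hlen'], ?_, r4⟩
        rw [r3]
        -- multiset bookkeeping: (h.set pos parent).set pp x  ~  h.set pos x
        have E1 := pv_mset_set h' pp x (0,0) (by rw [hlen']; exact hpplen)
        have E2 := pv_mset_set h pos parent (0,0) hlen
        have E3 := pv_mset_set h pos x (0,0) hlen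
        have hgpp' : h'.getD pp (0,0) = parent := by
          rw [hh', pv_getD_set_ne _ _ _ _ _ (by omega), hparent]
        rw [hgpp'] at E1
        set g := h.getD pos (0,0) with hg
        have key : g ::ₘ parent ::ₘ ((h'.set pp x : List (Int × Int)) : Multiset (Int × Int))
            = g ::ₘ parent ::ₘ ((h.set pos x : List (Int × Int)) : Multiset (Int × Int)) := by
          calc g ::ₘ parent ::ₘ ((h'.set pp x : List (Int × Int)) : Multiset (Int × Int))
              = g ::ₘ (x ::ₘ (h' : Multiset (Int × Int))) := by rw [E1]
            _ = x ::ₘ (g ::ₘ (h' : Multiset (Int × Int))) := Multiset.cons_swap _ _ _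
            _ = x ::ₘ (parent ::ₘ (h : Multiset (Int × Int))) := by rw [E2]
            _ = parent ::ₘ (x ::ₘ (h : Multiset (Int × Int))) := Multiset.cons_swap _ _ _
            _ = parent ::ₘ (g ::ₘ ((h.set pos x : List (Int × Int)) : Multiset (Int × Int))) := by
                rw [E3]
            _ = g ::ₘ parent ::ₘ ((h.set pos x : List (Int × Int)) : Multiset (Int × Int)) :=
                Multiset.cons_swap _ _ _
        exact (Multiset.cons_inj_right _).mp ((Multiset.cons_inj_right _).mp key)
      · -- stop: write x at pos
        have hx' : pvLt x parent = false := by simpa using hx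
        rw [pv_sdl_stop x h pos h0 (by rwa [← hparent])]
        refine ⟨hlen, rfl, rfl, ?_⟩
        intro i hi hilen
        simp only [List.length_set] at hilen
        by_cases hipos : i = pos
        · subst hipos
          rw [pv_getD_set_self _ _ _ _ hlen, pv_getD_set_ne _ _ _ _ _ (by omega)]
          exact hx'
        · exact hole.1 i hi hilen hipos

-- move h[j] into slot i, then overwrite slot j: same multiset as overwriting slot i directly
theorem pv_mset_shift (h : List (Int × Int)) (i j : Nat) (hi : i < h.length) (hj : j < h.length)
    (hij : i ≠ j) (x : Int × Int) :
    (((h.set i (h.getD j (0,0))).set j x : List (Int × Int)) : Multiset (Int × Int))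
      = ((h.set i x : List (Int × Int)) : Multiset (Int × Int)) := by
  set b := h.getD j (0,0) with hb
  set h' := h.set i b with hh'
  have E1 := pv_mset_set h' j x (0,0) (by simp [hh', hj])
  have E2 := pv_mset_set h i b (0,0) hi
  have E3 := pv_mset_set h i x (0,0) hi
  have hgj : h'.getD j (0,0) = b := by rw [hh', pv_getD_set_ne _ _ _ _ _ hij]
  rw [hgj] at E1
  set g := h.getD i (0,0) with hg
  have key : g ::ₘ b ::ₘ (((h'.set j x : List (Int × Int))) : Multiset (Int × Int))
      = g ::ₘ b ::ₘ ((h.set i x : List (Int × Int)) : Multiset (Int × Int)) := by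
    calc g ::ₘ b ::ₘ ((h'.set j x : List (Int × Int)) : Multiset (Int × Int))
        = g ::ₘ (x ::ₘ (h' : Multiset (Int × Int))) := by rw [E1]
      _ = x ::ₘ (g ::ₘ (h' : Multiset (Int × Int))) := Multiset.cons_swap _ _ _
      _ = x ::ₘ (b ::ₘ (h : Multiset (Int × Int))) := by rw [E2]
      _ = b ::ₘ (x ::ₘ (h : Multiset (Int × Int))) := Multiset.cons_swap _ _ _
      _ = b ::ₘ (g ::ₘ ((h.set i x : List (Int × Int)) : Multiset (Int × Int))) := by rw [E3]
      _ = g ::ₘ b ::ₘ ((h.set i x : List (Int × Int)) : Multiset (Int × Int)) :=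
          Multiset.cons_swap _ _ _
  exact (Multiset.cons_inj_right _).mp ((Multiset.cons_inj_right _).mp key)

theorem pv_getD_append_left {α : Type} (l l' : List α) (n : Nat) (d : α) (h : n < l.length) :
    (l ++ l').getD n d = l.getD n d := by
  simp [List.getD, List.getElem?_append_left h]

-- ---- heappush ----
theorem pv_push_spec (h : List (Int × Int)) (item : Int × Int) (inv : HInv h) :
    ((pvHeappush h item : List (Int × Int)) : Multiset (Int × Int)) = item ::ₘ (h : Multiset (Int × Int)) ∧
    HInv (pvHeappush h item) := by
  unfold pvHeappush pvSiftdown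
  have hni : (h ++ [item]).getD h.length (0,0) = item := pv_getD_append_length _ _ _
  have hset : (h ++ [item]).set h.length item = h ++ [item] := pv_set_append_last _ _ _
  have hlen : h.length < (h ++ [item]).length := by simp
  have hole : InvHole (h ++ [item]) h.length item := by
    constructor
    · intro i hi hilen hipos
      rw [hset]
      have hil : i < h.length := by simp at hilen; omega
      rw [pv_getD_append_left _ _ _ _ hil, pv_getD_append_left _ _ _ _ (by omega)]
      exact inv i hi hil
    · intro c hc hclen hcpar _
      simp at hclen
      omega
  obtain ⟨r1, r2, r3, r4⟩ := pv_sdl_spec item h.length (h ++ [item]) hlen hole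
  rw [hni]
  refine ⟨?_, r4⟩
  rw [r3, hset]
  simp

-- ---- heapq._siftup: descent invariant ----
def DInv (h : List (Int × Int)) (pos : Nat) : Prop :=
  (∀ i, 0 < i → i < h.length → i ≠ pos → (i-1)/2 ≠ pos →
     pvLt (h.getD i (0,0)) (h.getD ((i-1)/2) (0,0)) = false) ∧
  (∀ c, 0 < c → c < h.length → (c-1)/2 = pos → 0 < pos →
     pvLt (h.getD c (0,0)) (h.getD ((pos-1)/2) (0,0)) = false)

theorem pv_sul_stop (heap : List (Int × Int)) (pos childpos endpos : Nat)
    (hc : ¬ childpos < endpos) : pvSiftupLoop heap pos childpos endpos = (heap, pos) := by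
  rw [pvSiftupLoop]; simp [hc]

theorem pv_sul_step (heap : List (Int × Int)) (pos childpos endpos : Nat)
    (hc : childpos < endpos) :
    pvSiftupLoop heap pos childpos endpos =
      (let cp := if childpos + 1 < endpos && !(pvLt (heap.getD childpos (0,0)) (heap.getD (childpos+1) (0,0))) then childpos + 1 else childpos
       pvSiftupLoop (heap.set pos (heap.getD cp (0,0))) cp (2 * cp + 1) endpos) := by
  rw [pvSiftupLoop]; simp [hc, List.getD]

theorem pv_sul_spec : ∀ n pos (h : List (Int × Int)), h.length - pos ≤ n → pos < h.length →
    DInv h pos →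
    (pvSiftupLoop h pos (2*pos+1) h.length).2 < h.length ∧
    (pvSiftupLoop h pos (2*pos+1) h.length).1.length = h.length ∧
    h.length ≤ 2 * (pvSiftupLoop h pos (2*pos+1) h.length).2 + 1 ∧
    (∀ x, (((pvSiftupLoop h pos (2*pos+1) h.length).1.set (pvSiftupLoop h pos (2*pos+1) h.length).2 x : List (Int × Int)) : Multiset (Int × Int))
        = ((h.set pos x : List (Int × Int)) : Multiset (Int × Int))) ∧
    (∀ x, InvHole (pvSiftupLoop h pos (2*pos+1) h.length).1 (pvSiftupLoop h pos (2*pos+1) h.length).2 x) := by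
  intro n
  induction n with
  | zero => intro pos h hn hp _; omega
  | succ n ih =>
    intro pos h hn hp dinv
    by_cases hc : 2*pos+1 < h.length
    · rw [pv_sul_step h pos (2*pos+1) h.length hc]
      simp only []
      set cp := if 2*pos+1+1 < h.length && !(pvLt (h.getD (2*pos+1) (0,0)) (h.getD (2*pos+1+1) (0,0))) then 2*pos+1+1 else 2*pos+1 with hcp
      have hcp1 : cp = 2*pos+1 ∨ cp = 2*pos+2 := by
        rw [hcp]; split <;> omega
      have hcplen : cp < h.length := by
        by_cases hcond : (decide (2*pos+1+1 < h.length) && !(pvLt (h.getD (2*pos+1) (0,0)) (h.getD (2*pos+1+1) (0,0)))) = true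
        · rw [hcp, if_pos hcond]
          rw [Bool.and_eq_true] at hcond
          simpa using hcond.1
        · rw [hcp, if_neg hcond]; exact hc
      have hcppar : (cp - 1) / 2 = pos := by rcases hcp1 with e | e <;> rw [e] <;> omega
      -- the chosen child is the smaller of the (at most) two children
      have hmin : ∀ c, 0 < c → c < h.length → (c-1)/2 = pos → c ≠ cp →
          pvLt (h.getD c (0,0)) (h.getD cp (0,0)) = false := by
        intro c hc0 hclen hcpar2 hccp
        by_cases hcond : (decide (2*pos+1+1 < h.length) && !(pvLt (h.getD (2*pos+1) (0,0)) (h.getD (2*pos+1+1) (0,0)))) = true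
        · have ecp : cp = 2*pos+1+1 := by rw [hcp, if_pos hcond]
          have hcl : c = 2*pos+1 := by omega
          rw [Bool.and_eq_true] at hcond
          have hb := hcond.2
          rw [Bool.not_eq_true'] at hb
          rw [ecp, hcl]
          exact hb
        · have ecp : cp = 2*pos+1 := by rw [hcp, if_neg hcond]
          have hcr : c = 2*pos+1+1 := by omega
          have h2 : 2*pos+1+1 < h.length := by omega
          cases hX : pvLt (h.getD (2*pos+1) (0,0)) (h.getD (2*pos+1+1) (0,0)) with
          | false => exact absurd (by rw [hX]; simp [h2]) hcond
          | true =>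
            rw [ecp, hcr]
            exact pvLe_of_lt hX
      have hcpb : 2*pos+1 ≤ cp := by rcases hcp1 with e | e <;> omega
      set h' := h.set pos (h.getD cp (0,0)) with hh'
      have hlen' : h'.length = h.length := by simp [hh']
      have hgh' : ∀ j, j ≠ pos → j < h.length → h'.getD j (0,0) = h.getD j (0,0) := by
        intro j hj _
        rw [hh', pv_getD_set_ne _ _ _ _ _ (fun e => hj e.symm)]
      have hgpos : h'.getD pos (0,0) = h.getD cp (0,0) := by
        rw [hh', pv_getD_set_self _ _ _ _ hp]
      have dinv' : DInv h' cp := by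
        constructor
        · intro i hi hilen hicp hipar
          rw [hlen'] at hilen
          by_cases hipos : i = pos
          · -- edge (parent pos, pos): pos now holds h[cp], a child of pos: DInv clause 2
            rcases Nat.eq_zero_or_pos pos with hp0 | hp0
            · omega
            rw [hipos, hgpos, hgh' _ (by omega) (by omega)]
            exact dinv.2 cp (by omega) hcplen hcppar hp0
          · by_cases hppos : (i-1)/2 = pos
            · -- i is the sibling of cp (or cp itself, excluded): min-child choice
              rw [hgh' _ hipos hilen, hppos, hgpos]
              exact hmin i hi hilen hppos hicp
            · rw [hgh' _ hipos hilen, hgh' _ hppos (by omega)]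
              exact dinv.1 i hi hilen hipos hppos
        · intro c hc0 hclen hcpar2 hcp0
          rw [hlen'] at hclen
          rw [hcppar, hgpos, hgh' _ (by omega) hclen]
          have hd := dinv.1 c hc0 hclen (by omega) (by omega)
          rw [hcpar2] at hd
          exact hd
      have hrec := ih cp h' (by omega) (by rw [hlen']; exact hcplen) dinv'
      rw [hlen'] at hrec
      obtain ⟨r1, r2, r3, r4, r5⟩ := hrec
      refine ⟨r1, by rw [r2], r3, ?_, r5⟩
      intro x
      rw [r4 x, hh']
      exact pv_mset_shift h pos cp hp hcplen (by omega) x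
    · rw [pv_sul_stop h pos (2*pos+1) h.length hc]
      refine ⟨hp, rfl, show h.length ≤ 2*pos+1 by omega, fun x => rfl, ?_⟩
      intro x
      constructor
      · intro i hi hilen hipos
        have hilen' : i < h.length := hilen
        have hpar : (i-1)/2 ≠ pos := by omega
        rw [pv_getD_set_ne _ _ _ _ _ (fun e => hipos e.symm),
          pv_getD_set_ne _ _ _ _ _ (fun e => hpar e.symm)]
        exact dinv.1 i hi hilen' hipos hpar
      · intro c hc0 hclen hcpar _
        have hclen' : c < h.length := hclen
        omega

-- ---- heapq._siftup(heap, 0) ----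
theorem pv_siftup_spec (h : List (Int × Int)) (hne : h ≠ []) (pre : DInv h 0) :
    ((pvSiftup h 0 : List (Int × Int)) : Multiset (Int × Int)) = (h : Multiset (Int × Int)) ∧
    HInv (pvSiftup h 0) := by
  unfold pvSiftup
  simp only []
  have hp : 0 < h.length := List.length_pos_of_ne_nil hne
  obtain ⟨r1, r2, r3, r4, r5⟩ := pv_sul_spec h.length 0 h (by omega) hp pre
  set r := pvSiftupLoop h 0 (2*0+1) h.length with hr
  set newitem := h.getD 0 (0,0) with hni
  unfold pvSiftdown
  have hget : (r.1.set r.2 newitem).getD r.2 (0,0) = newitem :=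
    pv_getD_set_self _ _ _ _ (by rw [r2]; exact r1)
  rw [hget]
  have hole2 : InvHole (r.1.set r.2 newitem) r.2 newitem := by
    have h5 := r5 newitem
    constructor
    · intro i hi hilen hipos
      rw [List.set_set]
      simp only [List.length_set] at hilen
      exact h5.1 i hi hilen hipos
    · intro c hc0 hclen hcpar hpos0
      simp only [List.length_set] at hclen
      rw [pv_getD_set_ne _ _ _ _ _ (by omega), pv_getD_set_ne _ _ _ _ _ (by omega)]
      exact h5.2 c hc0 hclen hcpar hpos0
  obtain ⟨s1, s2, s3, s4⟩ := pv_sdl_spec newitem r.2 (r.1.set r.2 newitem)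
    (by simp only [List.length_set]; rw [r2]; exact r1) hole2
  refine ⟨?_, s4⟩
  rw [s3, List.set_set, r4 newitem, hni, pv_set_getD_self _ _ _ hp]

-- ---- heappop ----
theorem pv_pop_spec (h : List (Int × Int)) (hne : h ≠ []) (inv : HInv h) :
    (pvHeappop h).1 = h.getD 0 (0,0) ∧
    (h : Multiset (Int × Int)) = (pvHeappop h).1 ::ₘ ((pvHeappop h).2 : Multiset (Int × Int)) ∧
    HInv (pvHeappop h).2 := by
  unfold pvHeappop
  obtain ⟨last, hlast⟩ : ∃ l, h.getLast? = some l := by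
    cases hl : h.getLast? with
    | none => exact absurd (List.getLast?_eq_none_iff.mp hl) hne
    | some l => exact ⟨l, rfl⟩
  rw [hlast]
  have hdec : h = h.dropLast ++ [last] := by
    obtain ⟨l', rfl⟩ := List.getLast?_eq_some_iff.mp hlast
    simp
  by_cases hrest : h.dropLast.isEmpty
  · simp only [hrest, if_true]
    have he : h.dropLast = [] := List.isEmpty_iff.mp hrest
    rw [he] at hdec
    constructor
    · rw [hdec]; simp [List.getD]
    constructor
    · rw [hdec]; simp
    · intro i hi hilen
      rw [he] at hilen
      simp at hilen
  · simp only [hrest, Bool.false_eq_true, if_false]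
    have hrne : h.dropLast ≠ [] := fun e => by simp [e] at hrest
    have hrp : 0 < h.dropLast.length := List.length_pos_of_ne_nil hrne
    have hhl : h.length = h.dropLast.length + 1 := by rw [hdec]; simp
    set rest := h.dropLast with hrdef
    set heap1 := rest.set 0 last with hheap1
    have hg0 : rest.getD 0 (0,0) = h.getD 0 (0,0) := by
      conv_rhs => rw [hdec]
      rw [pv_getD_append_left _ _ _ _ hrp]
    have hgr : ∀ j, j < rest.length → rest.getD j (0,0) = h.getD j (0,0) := by
      intro j hj
      conv_rhs => rw [hdec]
      rw [pv_getD_append_left _ _ _ _ hj]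
    have pre1 : DInv heap1 0 := by
      constructor
      · intro i hi hilen hipos hipar
        rw [hheap1] at hilen; simp only [List.length_set] at hilen
        rw [hheap1, pv_getD_set_ne _ _ _ _ _ (by omega), pv_getD_set_ne _ _ _ _ _ (by omega),
          hgr i hilen, hgr _ (by omega)]
        exact inv i hi (by omega)
      · intro c _ _ _ h0; omega
    have h1ne : heap1 ≠ [] := by
      have hl1 : 0 < heap1.length := by rw [hheap1]; simpa using hrp
      exact List.ne_nil_of_length_pos hl1
    obtain ⟨m1, m2⟩ := pv_siftup_spec heap1 h1ne pre1
    refine ⟨hg0, ?_, m2⟩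
    rw [m1, hg0]
    have E := pv_mset_set rest 0 last (0,0) hrp
    rw [hg0] at E
    calc (h : Multiset (Int × Int)) = ((rest ++ [last] : List (Int × Int)) : Multiset (Int × Int)) := by rw [← hdec]
      _ = last ::ₘ (rest : Multiset (Int × Int)) := by simp
      _ = h.getD 0 (0,0) ::ₘ ((heap1 : List (Int × Int)) : Multiset (Int × Int)) := E.symm

-- ---- the first minimal element, shared characterisation of heap root and linear scan ----
def pvIsMin (m : Int × Int) (l : List (Int × Int)) : Prop :=
  m ∈ l ∧ ∀ x ∈ l, pvLt x m = false

theorem pv_min_unique {m1 m2 : Int × Int} {l1 l2 : List (Int × Int)}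
    (h1 : pvIsMin m1 l1) (h2 : pvIsMin m2 l2)
    (he : (l1 : Multiset (Int × Int)) = (l2 : Multiset (Int × Int))) : m1 = m2 := by
  have e1 : m1 ∈ l2 := by
    have := Multiset.mem_coe.mpr h1.1
    rw [he] at this
    exact Multiset.mem_coe.mp this
  have e2 : m2 ∈ l1 := by
    have := Multiset.mem_coe.mpr h2.1
    rw [← he] at this
    exact Multiset.mem_coe.mp this
  exact pvLe_antisymm (h2.2 m1 e1) (h1.2 m2 e2)

theorem pv_scan_step : ∀ (l : List (Int × Int)) (b : Int × Int),
    (l.foldl (fun best t => if pvLt t best then t else best) b = b ∨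
      l.foldl (fun best t => if pvLt t best then t else best) b ∈ l) ∧
    pvLt b (l.foldl (fun best t => if pvLt t best then t else best) b) = false ∧
    ∀ x ∈ l, pvLt x (l.foldl (fun best t => if pvLt t best then t else best) b) = false := by
  intro l
  induction l with
  | nil => intro b; exact ⟨Or.inl rfl, pvLt_irrefl b, by simp⟩
  | cons t rest ih =>
    intro b
    simp only [List.foldl_cons]
    set b' := if pvLt t b then t else b with hb'
    obtain ⟨m1, m2, m3⟩ := ih b'
    have hb'b : pvLt b b' = false := by
      rw [hb']; split
      · exact pvLe_of_lt (by assumption)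
      · exact pvLt_irrefl b
    have hb't : pvLt t b' = false := by
      rw [hb']; split
      · exact pvLt_irrefl t
      · simp_all
    refine ⟨?_, pvLe_trans m2 hb'b, ?_⟩
    · rcases m1 with e | e
      · by_cases hx : pvLt t b = true
        · right
          have eb : b' = t := by rw [hb', if_pos hx]
          rw [e, eb]
          exact List.mem_cons_self
        · left
          have eb : b' = b := by rw [hb', if_neg hx]
          rw [e, eb]
      · exact Or.inr (List.mem_cons_of_mem t e)
    · intro x hx
      rcases List.mem_cons.mp hx with rfl | hx'
      · exact pvLe_trans m2 hb't
      · exact m3 x hx'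

theorem pv_minscan_isMin (f : List (Int × Int)) (hne : f ≠ []) : pvIsMin (pvMinScan f) f := by
  obtain ⟨hd, tl, rfl⟩ := List.exists_cons_of_ne_nil hne
  unfold pvMinScan
  have hg : (hd :: tl).getD 0 (0,0) = hd := by simp [List.getD]
  rw [hg]
  obtain ⟨m1, _, m3⟩ := pv_scan_step (hd :: tl) hd
  refine ⟨?_, m3⟩
  rcases m1 with e | e
  · rw [e]; exact List.mem_cons_self
  · exact e

theorem pv_root_isMin (h : List (Int × Int)) (hne : h ≠ []) (inv : HInv h) :
    pvIsMin (h.getD 0 (0,0)) h := by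
  obtain ⟨hd, tl, rfl⟩ := List.exists_cons_of_ne_nil hne
  have hg : (hd :: tl).getD 0 (0,0) = hd := by simp [List.getD]
  refine ⟨by rw [hg]; exact List.mem_cons_self, fun x hx => pv_mem_le_root inv hx⟩

theorem pv_mset_append_singleton (l : List (Int × Int)) (x : Int × Int) :
    ((l ++ [x] : List (Int × Int)) : Multiset (Int × Int)) = x ::ₘ (l : Multiset (Int × Int)) := by
  simp

theorem pv_mset_erase (f : List (Int × Int)) (b : Int × Int) (hb : b ∈ f) :
    (f : Multiset (Int × Int)) = b ::ₘ ((f.erase b : List (Int × Int)) : Multiset (Int × Int)) := by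
  induction f with
  | nil => simp at hb
  | cons hd tl ih =>
    by_cases he : hd = b
    · subst he
      rw [List.erase_cons_head]
      simp
    · rw [List.erase_cons_tail (by simpa using he)]
      rcases List.mem_cons.mp hb with e | e
      · exact absurd e.symm he
      · calc ((hd :: tl : List (Int × Int)) : Multiset (Int × Int)) = hd ::ₘ (tl : Multiset (Int × Int)) := by simp
          _ = hd ::ₘ (b ::ₘ ((tl.erase b : List (Int × Int)) : Multiset (Int × Int))) := by rw [ih e]
          _ = b ::ₘ hd ::ₘ ((tl.erase b : List (Int × Int)) : Multiset (Int × Int)) := Multiset.cons_swap _ _ _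
          _ = b ::ₘ ((hd :: tl.erase b : List (Int × Int)) : Multiset (Int × Int)) := by simp

-- ---- the neighbour-push loops agree up to heap/list representation ----
theorem pv_pushfold (Alist : List Int) :
    ∀ (vs : List Int) (h f : List (Int × Int)) (seen : PySem.Set Int),
    HInv h → (h : Multiset (Int × Int)) = (f : Multiset (Int × Int)) →
    HInv (vs.foldl (pvPushA Alist) (h, seen)).1 ∧
    ((vs.foldl (pvPushA Alist) (h, seen)).1 : Multiset (Int × Int))
      = ((vs.foldl (pvPushB Alist) (f, seen)).1 : Multiset (Int × Int)) ∧
    (vs.foldl (pvPushA Alist) (h, seen)).2 = (vs.foldl (pvPushB Alist) (f, seen)).2 := by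
  intro vs
  induction vs with
  | nil => intro h f seen inv he; exact ⟨inv, he, rfl⟩
  | cons v rest ih =>
    intro h f seen inv he
    simp only [List.foldl_cons]
    by_cases hmem : v ∈ seen
    · rw [show pvPushA Alist (h, seen) v = (h, seen) by simp [pvPushA, hmem],
        show pvPushB Alist (f, seen) v = (f, seen) by simp [pvPushB, hmem]]
      exact ih h f seen inv he
    · rw [show pvPushA Alist (h, seen) v
          = (pvHeappush h (PySem.List.pyGetD Alist v 0, v), PySem.Set.add seen v) by
            simp [pvPushA, hmem],
        show pvPushB Alist (f, seen) v
          = (f ++ [(PySem.List.pyGetD Alist v 0, v)], PySem.Set.add seen v) by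
            simp [pvPushB, hmem]]
      obtain ⟨p1, p2⟩ := pv_push_spec h (PySem.List.pyGetD Alist v 0, v) inv
      refine ih _ _ _ p2 ?_
      rw [p1, pv_mset_append_singleton, he]

-- ---- the two expansion loops agree ----
theorem pv_expand_bisim (Alist : List Int) (adj : List (List Int)) :
    ∀ (fuel : Nat) (h f : List (Int × Int)) (sz : Int) (seen : PySem.Set Int) (won : List Int),
    HInv h → (h : Multiset (Int × Int)) = (f : Multiset (Int × Int)) →
    pvExpandA Alist adj fuel h sz seen won = pvExpandB Alist adj fuel f sz seen won := by
  intro fuel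
  induction fuel with
  | zero => intro h f sz seen won _ _; rfl
  | succ fuel ih =>
    intro h f sz seen won inv he
    have hperm : h.Perm f := Multiset.coe_eq_coe.mp he
    by_cases hne : h = []
    · have hfe : f = [] := by
        subst hne
        exact hperm.symm.eq_nil
      subst hne hfe
      simp [pvExpandA, pvExpandB]
    · have hfne : f ≠ [] := by
        intro e
        subst e
        exact hne hperm.eq_nil
      have hbest : pvMinScan f = h.getD 0 (0,0) :=
        pv_min_unique (pv_minscan_isMin f hfne) (pv_root_isMin h hne inv) he.symm
      by_cases hsz : (h.getD 0 (0,0)).1 ≤ sz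
      · -- both loops absorb the minimum
        obtain ⟨q1, q2, q3⟩ := pv_pop_spec h hne inv
        have hbmem : pvMinScan f ∈ f := (pv_minscan_isMin f hfne).1
        have hrem : (PySem.List.remove? f (pvMinScan f)).getD f = f.erase (pvMinScan f) := by
          rw [PySem.List.remove?_eq_some_erase f (pvMinScan f) hbmem]
          rfl
        have hm2 : ((pvHeappop h).2 : Multiset (Int × Int))
            = ((f.erase (pvMinScan f) : List (Int × Int)) : Multiset (Int × Int)) := by
          have e1 := pv_mset_erase f (pvMinScan f) hbmem
          rw [hbest] at e1
          rw [he, e1, ← q1] at q2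
          rw [hbest, ← q1]
          exact (Multiset.cons_inj_right _).mp q2.symm
        rw [show pvExpandA Alist adj (fuel+1) h sz seen won
            = pvExpandA Alist adj fuel
                ((PySem.List.pyGetD adj (pvHeappop h).1.2 []).foldl (pvPushA Alist) ((pvHeappop h).2, seen)).1
                (sz + 1)
                ((PySem.List.pyGetD adj (pvHeappop h).1.2 []).foldl (pvPushA Alist) ((pvHeappop h).2, seen)).2
                (PySem.List.pySetD won (pvHeappop h).1.2 1) by
          simp only [pvExpandA]
          rw [if_pos ⟨hne, hsz⟩]]
        rw [show pvExpandB Alist adj (fuel+1) f sz seen won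
            = pvExpandB Alist adj fuel
                ((PySem.List.pyGetD adj (pvMinScan f).2 []).foldl (pvPushB Alist) (f.erase (pvMinScan f), seen)).1
                (sz + 1)
                ((PySem.List.pyGetD adj (pvMinScan f).2 []).foldl (pvPushB Alist) (f.erase (pvMinScan f), seen)).2
                (PySem.List.pySetD won (pvMinScan f).2 1) by
          simp only [pvExpandB]
          rw [if_pos hfne, if_neg (by rw [hbest]; omega), hrem]]
        rw [hbest, q1]
        obtain ⟨w1, w2, w3⟩ := pv_pushfold Alist
          (PySem.List.pyGetD adj (h.getD 0 (0,0)).2 []) (pvHeappop h).2 (f.erase (h.getD 0 (0,0))) seen q3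
          (by rw [hm2, hbest])
        rw [w3]
        exact ih _ _ _ _ _ w1 w2
      · -- the minimum is still too strong: both loops stop
        rw [show pvExpandA Alist adj (fuel+1) h sz seen won = (sz, won) by
            simp only [pvExpandA]
            rw [if_neg (by intro hco; exact hsz hco.2)],
          show pvExpandB Alist adj (fuel+1) f sz seen won = (sz, won) by
            simp only [pvExpandB]
            rw [if_pos hfne, if_pos (by rw [hbest]; omega)]]

-- ---- the outer loops agree ----
theorem pv_outer_bisim (N : Int) (Alist : List Int) (adj : List (List Int)) (fuel : Nat) :
    ∀ (us won : List Int),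
    pvOuterA N Alist adj fuel us won = pvOuterB N Alist adj fuel us won := by
  intro us
  induction us with
  | nil => intro won; rfl
  | cons u rest ih =>
    intro won
    simp only [pvOuterA, pvOuterB]
    by_cases hskip : PySem.List.pyGetD won u 0 ≠ 0 ∨ PySem.List.pyGetD Alist u 0 ≠ 0
    · rw [if_pos hskip, if_pos hskip]
      exact ih won
    · rw [if_neg hskip, if_neg hskip]
      have hE := pv_expand_bisim Alist adj fuel
        [(PySem.List.pyGetD Alist u 0, u)] [(PySem.List.pyGetD Alist u 0, u)] 0
        (PySem.Set.add PySem.Set.empty u) won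
        (by intro i hi hilen; simp at hilen; omega) rfl
      rw [hE]
      by_cases hend : (pvExpandB Alist adj fuel [(PySem.List.pyGetD Alist u 0, u)] 0
          (PySem.Set.add PySem.Set.empty u) won).1 == N
      · rw [if_pos hend, if_pos hend]
      · rw [if_neg hend, if_neg hend]
        exact ih _

theorem solve_spec : Claim_equal_solve := by
  intro N M A edges _dom _pre
  unfold Spec_solve solve solve_alt
  exact pv_outer_bisim N A (pvAdj N edges) (2 * edges.length + 2) _ _
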